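-- pv_equiv track=rewrite | github.com/vitor-lima-ms/challenges | beecreowd_1031_unsolved.py | remove_last_occurence
-- ===== SOURCE A (Python) =====
-- def remove_last_occurence(list_, num):
--     last_index = -1
--
--     for index, value in enumerate(list_):
--         if value == num:
--             last_index = index
--
--     if last_index != -1:
--         list_.pop(last_index)
--
--     return list_
-- ===== SOURCE B (Python) =====
-- def remove_last_occurence(list_, num):
--     rev = list_[::-1]
--     if num in rev:
--         rev.remove(num)
--         list_[:] = rev[::-1]
--     return list_
-- ===== Notes on version B (the rewrite author's own statement) =====
-- stated objective: alternative
-- what changed: Replaces the forward enumerate pass that maintains a last_index accumulator (plus a pop by index) with a reverse-the-list, remove-first-occurrence, reverse-back decomposition that keeps no running index.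
import Mathlib
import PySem

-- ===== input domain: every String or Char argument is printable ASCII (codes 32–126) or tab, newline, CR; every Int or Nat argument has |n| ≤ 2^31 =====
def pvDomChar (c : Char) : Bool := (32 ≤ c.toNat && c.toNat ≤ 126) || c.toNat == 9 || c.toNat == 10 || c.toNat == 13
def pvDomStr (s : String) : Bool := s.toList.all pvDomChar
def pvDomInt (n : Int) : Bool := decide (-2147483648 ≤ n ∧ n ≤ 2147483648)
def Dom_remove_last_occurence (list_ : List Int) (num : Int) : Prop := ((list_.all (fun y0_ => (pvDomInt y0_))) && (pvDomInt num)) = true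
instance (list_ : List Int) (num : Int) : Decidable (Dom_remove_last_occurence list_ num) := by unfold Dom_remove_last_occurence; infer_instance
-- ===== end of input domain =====

-- B replaces A's forward scan with a last_index accumulator by reverse / remove-first / reverse-back
-- (an 'alternative' decomposition, same cost). Both Pythons mutate list_ in place the same way;
-- the theorems below are about the returned value.

-- ===== PORT A =====
def remove_last_occurence (list_ : List Int) (num : Int) : List Int :=
  -- last_index = -1; for index, value in enumerate(list_): if value == num: last_index = index
  let last_index : Int :=
    (PySem.List.enumerate list_ 0).foldl
      (fun acc p => if p.2 = num then p.1 else acc) (-1)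
  -- if last_index != -1: list_.pop(last_index)
  if last_index ≠ -1 then
    match PySem.List.pop? list_ last_index with
    | some r => r.2
    | none => list_   -- unreachable: last_index is a valid index when ≠ -1
  else list_

-- ===== PORT B =====
def remove_last_occurence_alt (list_ : List Int) (num : Int) : List Int :=
  let rev := list_.reverse          -- rev = list_[::-1]
  if num ∈ rev then
    match PySem.List.remove? rev num with
    | some r => r.reverse           -- rev.remove(num); list_[:] = rev[::-1]
    | none => list_                 -- unreachable: num ∈ rev
  else list_

-- ===== PRECONDITION & SPEC =====
def Spec_remove_last_occurence (list_ : List Int) (num : Int) (out : List Int) : Prop := out = remove_last_occurence_alt list_ num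
instance (list_ : List Int) (num : Int) (out : List Int) : Decidable (Spec_remove_last_occurence list_ num out) := by unfold Spec_remove_last_occurence; infer_instance

-- ===== CLAIM (what is proved, stated in full; the proofs are below) =====
def Claim_equal_remove_last_occurence : Prop := ∀ (list_ : List Int) (num : Int), Dom_remove_last_occurence list_ num → Spec_remove_last_occurence list_ num (remove_last_occurence list_ num)

-- ===== LEMMAS AND PROOFS =====

-- the common semantics: remove the LAST occurrence of num, none if absent
def rmLast : List Int → Int → Option (List Int)
  | [], _ => none
  | x :: xs, n =>
    match rmLast xs n with
    | some r => some (x :: r)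
    | none => if x = n then some xs else none

-- A's last_index fold, named so it can be characterised
def lastFold (list_ : List Int) (num : Int) : Int :=
  (PySem.List.enumerate list_ 0).foldl
    (fun acc p => if p.2 = num then p.1 else acc) (-1)

theorem rmLast_append_singleton (ys : List Int) (y n : Int) :
    rmLast (ys ++ [y]) n = if y = n then some ys else (rmLast ys n).map (· ++ [y]) := by
  induction ys with
  | nil => simp [rmLast]
  | cons x xs ih =>
    simp only [List.cons_append, rmLast, ih]
    by_cases hy : y = n
    · simp [hy]
    · simp only [if_neg hy]
      cases h : rmLast xs n with
      | some r => simp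
      | none => by_cases hx : x = n <;> simp [hx]

theorem lastFold_append_singleton (ys : List Int) (y n : Int) :
    lastFold (ys ++ [y]) n = if y = n then (ys.length : Int) else lastFold ys n := by
  simp only [lastFold, PySem.List.enumerate_append, List.foldl_append]
  simp [PySem.List.enumerate]

-- joint characterisation of A's fold, the pop, and rmLast
theorem lastFold_pop_char (num : Int) (l : List Int) :
    (lastFold l num = -1 ∧ rmLast l num = none) ∨
    (∃ k : Nat, lastFold l num = (k : Int) ∧
      ∃ r, rmLast l num = some r ∧ PySem.List.pop? l (k : Int) = some (l[k]?.getD 0, r)) := by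
  induction l using List.reverseRecOn with
  | nil => left; constructor <;> simp [lastFold, rmLast, PySem.List.enumerate]
  | append_singleton ys y ih =>
    rw [lastFold_append_singleton, rmLast_append_singleton]
    by_cases hy : y = num
    · right
      refine ⟨ys.length, by simp [hy], ys, by simp [hy], ?_⟩
      have hlt : ys.length < (ys ++ [y]).length := by simp
      rw [PySem.List.pop?_natCast (ys ++ [y]) ys.length hlt,
        List.eraseIdx_append_of_length_le (le_refl _)]
      simp [hy]
    · rcases ih with ⟨h1, h2⟩ | ⟨k, hk, r, hr, hp⟩
      · left; simp [hy, h1, h2]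
      · right
        refine ⟨k, by simp [hy, hk], r ++ [y], by simp [hy, hr], ?_⟩
        have hklt : k < ys.length := by
          by_contra hge
          simp [PySem.List.pop?, PySem.List.pyIdx?, hge] at hp
        have hlt : k < (ys ++ [y]).length := by simp; omega
        rw [PySem.List.pop?_natCast (ys ++ [y]) k hlt]
        rw [PySem.List.pop?_natCast ys k hklt] at hp
        have h1 : ys[k] = (ys ++ [y])[k]'hlt := (List.getElem_append_left hklt).symm
        have h2 : ys.eraseIdx k = r := by simpa using congrArg (fun o => (o.map Prod.snd).getD []) hp
        have h3 : (ys ++ [y]).eraseIdx k = ys.eraseIdx k ++ [y] :=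
          List.eraseIdx_append_of_lt_length hklt [y]
        have h4 : ys[k] = ys[k]?.getD 0 := by simp [List.getElem?_eq_getElem hklt]
        have h5 : (ys ++ [y])[k]?.getD 0 = ys[k]?.getD 0 := by
          rw [List.getElem?_append_left hklt]
        simp [h3, h2, ← h1, h5, ← h4]

theorem A_eq_rmLast (l : List Int) (num : Int) :
    remove_last_occurence l num = (rmLast l num).getD l := by
  show (if lastFold l num ≠ -1 then
          match PySem.List.pop? l (lastFold l num) with
          | some r => r.2
          | none => l
        else l) = (rmLast l num).getD l
  rcases lastFold_pop_char num l with ⟨h1, h2⟩ | ⟨k, hk, r, hr, hp⟩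
  · simp [h1, h2]
  · have hne : lastFold l num ≠ -1 := by rw [hk]; omega
    simp [hk, hp, hr]

theorem remove?_reverse_eq_rmLast (l : List Int) (num : Int) :
    (PySem.List.remove? l.reverse num).map List.reverse = rmLast l num := by
  induction l using List.reverseRecOn with
  | nil => simp [rmLast, PySem.List.remove?]
  | append_singleton ys y ih =>
    rw [rmLast_append_singleton, List.reverse_append]
    simp only [List.reverse_singleton, List.singleton_append]
    by_cases hy : y = num
    · subst hy; simp [PySem.List.remove?_cons_self]
    · rw [PySem.List.remove?_cons_of_ne ys.reverse hy, if_neg hy, ← ih]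
      cases PySem.List.remove? ys.reverse num <;> simp

theorem B_eq_rmLast (l : List Int) (num : Int) :
    remove_last_occurence_alt l num = (rmLast l num).getD l := by
  show (if num ∈ l.reverse then
          match PySem.List.remove? l.reverse num with
          | some r => r.reverse
          | none => l
        else l) = (rmLast l num).getD l
  by_cases hm : num ∈ l.reverse
  · cases h : PySem.List.remove? l.reverse num with
    | none => exact absurd ((PySem.List.remove?_eq_none_iff _ _).mp h) (by simpa using hm)
    | some r =>
      have := remove?_reverse_eq_rmLast l num
      rw [h] at this
      simp [hm, ← this]
  · have h : PySem.List.remove? l.reverse num = none :=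
      (PySem.List.remove?_eq_none_iff _ _).mpr (by simpa using hm)
    have := remove?_reverse_eq_rmLast l num
    rw [h] at this
    simp [hm, ← this]

-- ===== VERDICT (by name: the statement is the Claim_ definition above) =====
theorem remove_last_occurence_spec : Claim_equal_remove_last_occurence := by
  intro l num _
  show remove_last_occurence l num = remove_last_occurence_alt l num
  rw [A_eq_rmLast, B_eq_rmLast]
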